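-- pv_equiv track=rewrite | github.com/victorffernandes/homomorphic-cli | lssvm/solvers/cg_cipher.py | _rotation_indices
-- ===== SOURCE A (Python) =====
-- def _rotation_indices(matrix_size, n_test=None, feature_dim=None):
--     matrix_size = max(1, int(matrix_size or 1))
--     n_test = max(1, int(n_test or matrix_size))
--     neg_shift_limit = max(matrix_size, n_test)
--
--     pos = list(range(1, matrix_size))
--     neg = [-i for i in range(1, neg_shift_limit)]
--
--     pos_pow2, step = [], 1
--     while step < matrix_size:
--         pos_pow2.append(step)
--         step *= 2
--     neg_pow2, step = [], 1
--     while step < matrix_size: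
--         neg_pow2.append(-step)
--         step *= 2
--
--     feat_pow2 = []
--     if feature_dim is not None and feature_dim > matrix_size:
--         step = 1
--         while step < feature_dim:
--             feat_pow2.append(step)
--             step *= 2
--
--     return sorted(set(pos + neg + pos_pow2 + neg_pow2 + feat_pow2))
-- ===== SOURCE B (Python) =====
-- def _rotation_indices(matrix_size, n_test=None, feature_dim=None):
--     m = max(1, int(matrix_size or 1))
--     t = max(1, int(n_test or m))
--     limit = max(m, t)
--     # already-sorted output: contiguous negatives, contiguous positives,
--     # then the powers of two >= m below feature_dim (the only values not
--     # already covered by the contiguous ranges)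
--     out = list(range(-(limit - 1), 0)) + list(range(1, m))
--     if feature_dim is not None and feature_dim > m:
--         p = 1
--         while p < m:
--             p *= 2
--         while p < feature_dim:
--             out.append(p)
--             p *= 2
--     return out
-- ===== Notes on version B (the rewrite author's own statement) =====
-- stated objective: faster
-- what changed: Instead of concatenating five overlapping lists, deduplicating via set() and sorting, B emits the result directly in sorted order: the contiguous negative range, the contiguous positive range, then the few powers of two >= matrix_size below feature_dim.
import Mathlib
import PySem

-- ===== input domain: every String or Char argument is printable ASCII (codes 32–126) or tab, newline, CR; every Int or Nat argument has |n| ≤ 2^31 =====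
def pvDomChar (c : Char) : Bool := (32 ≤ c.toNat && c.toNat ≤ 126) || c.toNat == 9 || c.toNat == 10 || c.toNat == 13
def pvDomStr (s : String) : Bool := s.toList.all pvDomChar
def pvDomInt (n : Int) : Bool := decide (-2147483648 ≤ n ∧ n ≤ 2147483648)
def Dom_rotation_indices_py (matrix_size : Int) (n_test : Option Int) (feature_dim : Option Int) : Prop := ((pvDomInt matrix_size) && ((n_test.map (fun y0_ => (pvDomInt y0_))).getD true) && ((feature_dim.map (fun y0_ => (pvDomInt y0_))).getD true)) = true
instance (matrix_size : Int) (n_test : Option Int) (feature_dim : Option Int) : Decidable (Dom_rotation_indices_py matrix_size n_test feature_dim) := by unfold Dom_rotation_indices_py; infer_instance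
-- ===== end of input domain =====

-- B builds the sorted result directly (negative range, positive range, then the powers of
-- two ≥ matrix_size below feature_dim) instead of A's concatenate-five-lists + set() + sorted().
-- The doubling while-loops are ported with a Nat fuel that only makes them total: with the
-- fuel the ports pass ((bound - step).toNat), the loop always stops on `step < bound` first.

-- ===== PORT A =====
-- A's `while step < bound: acc.append(step); step *= 2` loop (positive variant)
def pow2Asc (bound : Int) : Nat → Int → List Int
  | 0, _ => []
  | fuel + 1, step => if step < bound then step :: pow2Asc bound fuel (2 * step) else []

-- A's `while step < bound: acc.append(-step); step *= 2` loop (negative variant)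
def pow2AscNeg (bound : Int) : Nat → Int → List Int
  | 0, _ => []
  | fuel + 1, step => if step < bound then (-step) :: pow2AscNeg bound fuel (2 * step) else []

def rotation_indices_py (matrix_size : Int) (n_test : Option Int) (feature_dim : Option Int) : List Int :=
  -- matrix_size = max(1, int(matrix_size or 1))  (ints: `or` tests truthiness, i.e. ≠ 0)
  let m : Int := max 1 (if matrix_size = 0 then 1 else matrix_size)
  -- n_test = max(1, int(n_test or matrix_size))
  let nt : Int := max 1 (match n_test with
    | none => m
    | some v => if v = 0 then m else v)
  let neg_shift_limit : Int := max m nt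
  let pos := PySem.List.pyRange 1 m 1
  let neg := (PySem.List.pyRange 1 neg_shift_limit 1).map (fun i => -i)
  let pos_pow2 := pow2Asc m ((m - 1).toNat) 1
  let neg_pow2 := pow2AscNeg m ((m - 1).toNat) 1
  let feat_pow2 := match feature_dim with
    | some fd => if m < fd then pow2Asc fd ((fd - 1).toNat) 1 else []
    | none => []
  PySem.List.sorted (PySem.Set.ofList (pos ++ neg ++ pos_pow2 ++ neg_pow2 ++ feat_pow2)) (fun x => x) false

-- ===== PORT B =====
-- B's `while p < m: p *= 2` loop: the first step*2^k that is ≥ bound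
def firstPowGE (bound : Int) : Nat → Int → Int
  | 0, step => step
  | fuel + 1, step => if step < bound then firstPowGE bound fuel (2 * step) else step

-- B's `while p < feature_dim: out.append(p); p *= 2` loop
def powsBelow (bound : Int) : Nat → Int → List Int
  | 0, _ => []
  | fuel + 1, step => if step < bound then step :: powsBelow bound fuel (2 * step) else []

def rotation_indices_py_alt (matrix_size : Int) (n_test : Option Int) (feature_dim : Option Int) : List Int :=
  let m : Int := max 1 (if matrix_size = 0 then 1 else matrix_size)
  let t : Int := max 1 (match n_test with
    | none => m
    | some v => if v = 0 then m else v)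
  let limit : Int := max m t
  let out := PySem.List.pyRange (-(limit - 1)) 0 1 ++ PySem.List.pyRange 1 m 1
  match feature_dim with
  | some fd =>
      if m < fd then
        let p := firstPowGE m ((m - 1).toNat) 1
        out ++ powsBelow fd ((fd - p).toNat) p
      else out
  | none => out

-- ===== PRECONDITION & SPEC =====
def Spec_rotation_indices_py (matrix_size : Int) (n_test : Option Int) (feature_dim : Option Int) (out : List Int) : Prop := out = rotation_indices_py_alt matrix_size n_test feature_dim
instance (matrix_size : Int) (n_test : Option Int) (feature_dim : Option Int) (out : List Int) : Decidable (Spec_rotation_indices_py matrix_size n_test feature_dim out) := by unfold Spec_rotation_indices_py; infer_instance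

-- ===== CLAIM (what is proved, stated in full; the proofs are below) =====
def Claim_equal_rotation_indices_py : Prop := ∀ (matrix_size : Int) (n_test : Option Int) (feature_dim : Option Int), Dom_rotation_indices_py matrix_size n_test feature_dim → Spec_rotation_indices_py matrix_size n_test feature_dim (rotation_indices_py matrix_size n_test feature_dim)

-- ===== LEMMAS AND PROOFS =====

-- enough fuel: the loop stops on `step < bound` before the fuel runs out
theorem mem_pow2Asc (bound : Int) (fuel : Nat) (step x : Int) (hs : 0 < step)
    (hf : (bound - step).toNat ≤ fuel) :
    x ∈ pow2Asc bound fuel step ↔ ∃ k : ℕ, x = step * 2 ^ k ∧ x < bound := by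
  induction fuel generalizing step with
  | zero =>
    simp only [pow2Asc, List.not_mem_nil, false_iff]
    rintro ⟨k, rfl, hb⟩
    have h1 : (1 : Int) ≤ 2 ^ k := one_le_pow₀ (by norm_num)
    have hbs : bound ≤ step := by omega
    nlinarith
  | succ n ih =>
    simp only [pow2Asc]
    split
    · rename_i h
      rw [List.mem_cons, ih (2 * step) (by omega) (by omega)]
      constructor
      · rintro (rfl | ⟨k, rfl, hb⟩)
        · exact ⟨0, by ring_nf, h⟩
        · exact ⟨k + 1, by ring, by linarith⟩
      · rintro ⟨k, rfl, hb⟩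
        cases k with
        | zero => left; ring
        | succ k => right; exact ⟨k, by ring, by linarith [(by ring : 2 * step * 2 ^ k = step * 2 ^ (k+1))]⟩
    · rename_i h
      simp only [List.not_mem_nil, false_iff]
      rintro ⟨k, rfl, hb⟩
      have h1 : (1 : Int) ≤ 2 ^ k := one_le_pow₀ (by norm_num)
      nlinarith

theorem mem_powsBelow (bound : Int) (fuel : Nat) (step x : Int) (hs : 0 < step)
    (hf : (bound - step).toNat ≤ fuel) :
    x ∈ powsBelow bound fuel step ↔ ∃ k : ℕ, x = step * 2 ^ k ∧ x < bound := by
  induction fuel generalizing step with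
  | zero =>
    simp only [powsBelow, List.not_mem_nil, false_iff]
    rintro ⟨k, rfl, hb⟩
    have h1 : (1 : Int) ≤ 2 ^ k := one_le_pow₀ (by norm_num)
    have hbs : bound ≤ step := by omega
    nlinarith
  | succ n ih =>
    simp only [powsBelow]
    split
    · rename_i h
      rw [List.mem_cons, ih (2 * step) (by omega) (by omega)]
      constructor
      · rintro (rfl | ⟨k, rfl, hb⟩)
        · exact ⟨0, by ring_nf, h⟩
        · exact ⟨k + 1, by ring, by linarith⟩
      · rintro ⟨k, rfl, hb⟩
        cases k with
        | zero => left; ring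
        | succ k => right; exact ⟨k, by ring, by linarith [(by ring : 2 * step * 2 ^ k = step * 2 ^ (k+1))]⟩
    · rename_i h
      simp only [List.not_mem_nil, false_iff]
      rintro ⟨k, rfl, hb⟩
      have h1 : (1 : Int) ≤ 2 ^ k := one_le_pow₀ (by norm_num)
      nlinarith

theorem pow2AscNeg_eq (bound : Int) (fuel : Nat) (step : Int) :
    pow2AscNeg bound fuel step = (pow2Asc bound fuel step).map (fun s => -s) := by
  induction fuel generalizing step with
  | zero => simp [pow2AscNeg, pow2Asc]
  | succ n ih =>
    simp only [pow2AscNeg, pow2Asc]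
    split
    · simp [ih]
    · simp

-- elements of the powsBelow loop lie in [step, bound) (no fuel hypothesis needed)
theorem bounds_of_mem_powsBelow (bound : Int) (fuel : Nat) (step x : Int) (hs : 0 < step)
    (hx : x ∈ powsBelow bound fuel step) : step ≤ x ∧ x < bound := by
  induction fuel generalizing step with
  | zero => simp [powsBelow] at hx
  | succ n ih =>
    simp only [powsBelow] at hx
    split at hx
    · rename_i h
      rcases List.mem_cons.mp hx with rfl | hx
      · omega
      · have := ih (2 * step) (by omega) hx
        omega
    · simp at hx

theorem pairwise_powsBelow (bound : Int) (fuel : Nat) (step : Int) (hs : 0 < step) :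
    (powsBelow bound fuel step).Pairwise (· < ·) := by
  induction fuel generalizing step with
  | zero => simp [powsBelow]
  | succ n ih =>
    simp only [powsBelow]
    split
    · refine List.Pairwise.cons (fun y hy => ?_) (ih (2 * step) (by omega))
      have := bounds_of_mem_powsBelow bound n (2 * step) y (by omega) hy
      omega
    · exact List.Pairwise.nil

-- with enough fuel, firstPowGE returns step*2^k ≥ bound with every earlier step*2^j < bound
theorem firstPowGE_spec (bound : Int) (fuel : Nat) (step : Int) (hs : 0 < step)
    (hf : (bound - step).toNat ≤ fuel) :
    ∃ k : ℕ, firstPowGE bound fuel step = step * 2 ^ k ∧ bound ≤ step * 2 ^ k ∧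
      ∀ j : ℕ, j < k → step * 2 ^ j < bound := by
  induction fuel generalizing step with
  | zero =>
    refine ⟨0, by simp [firstPowGE], by simp; omega, by omega⟩
  | succ n ih =>
    simp only [firstPowGE]
    split
    · rename_i h
      obtain ⟨k, he, hb, hmin⟩ := ih (2 * step) (by omega) (by omega)
      refine ⟨k + 1, by rw [he]; ring, by calc bound ≤ 2 * step * 2 ^ k := hb
                                            _ = step * 2 ^ (k + 1) := by ring, ?_⟩
      intro j hj
      cases j with
      | zero => simpa using h
      | succ j =>
          have := hmin j (by omega)
          calc step * 2 ^ (j + 1) = 2 * step * 2 ^ j := by ring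
            _ < bound := this
    · rename_i h
      exact ⟨0, by ring_nf, by omega, by omega⟩

theorem firstPowGE_pos (bound : Int) (fuel : Nat) (step : Int) (hs : 0 < step) :
    0 < firstPowGE bound fuel step := by
  induction fuel generalizing step with
  | zero => simpa [firstPowGE] using hs
  | succ n ih =>
    simp only [firstPowGE]
    split
    · exact ih (2 * step) (by omega)
    · exact hs

-- membership in B's output (with the extra-powers chunk), as a closed-form condition
theorem mem_alt_chunks (m limit fd x : Int) (hm : 1 ≤ m) (hfd : m < fd) :
    (x ∈ PySem.List.pyRange (-(limit - 1)) 0 1 ++ PySem.List.pyRange 1 m 1 ++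
        powsBelow fd ((fd - firstPowGE m ((m - 1).toNat) 1).toNat) (firstPowGE m ((m - 1).toNat) 1)) ↔
      ((-(limit - 1) ≤ x ∧ x < 0) ∨ (1 ≤ x ∧ x < m) ∨ (∃ a : ℕ, x = 2 ^ a ∧ m ≤ x ∧ x < fd)) := by
  obtain ⟨k, he, hb, hmin⟩ := firstPowGE_spec m ((m - 1).toNat) 1 one_pos (by omega)
  have hp : 0 < firstPowGE m ((m - 1).toNat) 1 := firstPowGE_pos m ((m - 1).toNat) 1 one_pos
  simp only [List.mem_append, PySem.List.mem_pyRange_one,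
    mem_powsBelow fd ((fd - firstPowGE m ((m - 1).toNat) 1).toNat) (firstPowGE m ((m - 1).toNat) 1) x hp (le_refl _)]
  constructor
  · rintro ((h | h) | ⟨i, hx, hlt⟩)
    · exact Or.inl h
    · exact Or.inr (Or.inl h)
    · refine Or.inr (Or.inr ⟨k + i, ?_, ?_, hlt⟩)
      · rw [hx, he, pow_add]; ring
      · rw [hx, he]
        have h1 : (1 : Int) ≤ 2 ^ i := one_le_pow₀ (by norm_num)
        nlinarith
  · rintro (h | h | ⟨a, rfl, hge, hlt⟩)
    · exact Or.inl (Or.inl h)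
    · exact Or.inl (Or.inr h)
    · right
      have hak : k ≤ a := by
        by_contra hc
        have := hmin a (by omega)
        omega
      refine ⟨a - k, ?_, hlt⟩
      have hsplit : (2 : Int) ^ a = 2 ^ k * 2 ^ (a - k) := by
        rw [← pow_add]; congr 1; omega
      rw [he, one_mul, hsplit]

-- membership in B's output without the extra-powers chunk
theorem mem_alt_base (m limit x : Int) :
    (x ∈ PySem.List.pyRange (-(limit - 1)) 0 1 ++ PySem.List.pyRange 1 m 1) ↔
      ((-(limit - 1) ≤ x ∧ x < 0) ∨ (1 ≤ x ∧ x < m)) := by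
  simp only [List.mem_append, PySem.List.mem_pyRange_one]

-- membership in A's five-list concatenation, as the same closed-form condition
theorem mem_a_concat (m limit fd x : Int) (hm : 1 ≤ m) (hml : m ≤ limit) (hfd : m < fd) :
    (x ∈ PySem.List.pyRange 1 m 1 ++ (PySem.List.pyRange 1 limit 1).map (fun i => -i) ++
        pow2Asc m ((m - 1).toNat) 1 ++ pow2AscNeg m ((m - 1).toNat) 1 ++
        pow2Asc fd ((fd - 1).toNat) 1) ↔
      ((-(limit - 1) ≤ x ∧ x < 0) ∨ (1 ≤ x ∧ x < m) ∨ (∃ a : ℕ, x = 2 ^ a ∧ m ≤ x ∧ x < fd)) := by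
  have hmemA := fun (z : Int) => mem_pow2Asc m ((m - 1).toNat) 1 z one_pos (le_refl _)
  have hmemF := fun (z : Int) => mem_pow2Asc fd ((fd - 1).toNat) 1 z one_pos (le_refl _)
  simp only [List.mem_append, List.mem_map, PySem.List.mem_pyRange_one,
    hmemA, hmemF, pow2AscNeg_eq, one_mul]
  constructor
  · rintro ((((h | ⟨i, hi, rfl⟩) | ⟨a, rfl, hlt⟩) | ⟨y, ⟨a, rfl, hlt⟩, rfl⟩) | ⟨a, rfl, hlt⟩)
    · exact Or.inr (Or.inl h)
    · exact Or.inl ⟨by omega, by omega⟩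
    · have h1 : (1 : Int) ≤ 2 ^ a := one_le_pow₀ (by norm_num)
      exact Or.inr (Or.inl ⟨h1, hlt⟩)
    · have h1 : (1 : Int) ≤ 2 ^ a := one_le_pow₀ (by norm_num)
      exact Or.inl ⟨by omega, by omega⟩
    · have h1 : (1 : Int) ≤ 2 ^ a := one_le_pow₀ (by norm_num)
      by_cases hc : (2 : Int) ^ a < m
      · exact Or.inr (Or.inl ⟨h1, hc⟩)
      · exact Or.inr (Or.inr ⟨a, rfl, by omega, hlt⟩)
  · rintro (h | h | ⟨a, rfl, hge, hlt⟩)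
    · exact Or.inl (Or.inl (Or.inl (Or.inr ⟨-x, ⟨by omega, by omega⟩, by ring⟩)))
    · exact Or.inl (Or.inl (Or.inl (Or.inl h)))
    · exact Or.inr ⟨a, rfl, hlt⟩

-- A's concatenation without feat_pow2 (feature_dim absent or ≤ m)
theorem mem_a_concat_base (m limit x : Int) (hm : 1 ≤ m) (hml : m ≤ limit) :
    (x ∈ PySem.List.pyRange 1 m 1 ++ (PySem.List.pyRange 1 limit 1).map (fun i => -i) ++
        pow2Asc m ((m - 1).toNat) 1 ++ pow2AscNeg m ((m - 1).toNat) 1) ↔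
      ((-(limit - 1) ≤ x ∧ x < 0) ∨ (1 ≤ x ∧ x < m)) := by
  have hmemA := fun (z : Int) => mem_pow2Asc m ((m - 1).toNat) 1 z one_pos (le_refl _)
  simp only [List.mem_append, List.mem_map, PySem.List.mem_pyRange_one,
    hmemA, pow2AscNeg_eq, one_mul]
  constructor
  · rintro (((h | ⟨i, hi, rfl⟩) | ⟨a, rfl, hlt⟩) | ⟨y, ⟨a, rfl, hlt⟩, rfl⟩)
    · exact Or.inr h
    · exact Or.inl ⟨by omega, by omega⟩
    · have h1 : (1 : Int) ≤ 2 ^ a := one_le_pow₀ (by norm_num)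
      exact Or.inr ⟨h1, hlt⟩
    · have h1 : (1 : Int) ≤ 2 ^ a := one_le_pow₀ (by norm_num)
      exact Or.inl ⟨by omega, by omega⟩
  · rintro (h | h)
    · exact Or.inl (Or.inl (Or.inr ⟨-x, ⟨by omega, by omega⟩, by ring⟩))
    · exact Or.inl (Or.inl (Or.inl h))

theorem pairwise_base (m limit : Int) :
    (PySem.List.pyRange (-(limit - 1)) 0 1 ++ PySem.List.pyRange 1 m 1).Pairwise (· < ·) := by
  refine List.pairwise_append.mpr ⟨PySem.List.pairwise_lt_pyRange_one _ _,
    PySem.List.pairwise_lt_pyRange_one _ _, ?_⟩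
  intro x hx y hy
  rw [PySem.List.mem_pyRange_one] at hx hy
  omega

theorem pairwise_ext (m limit fd p : Int) (fuel : Nat) (hp : 0 < p) (hmp : m ≤ p) :
    (PySem.List.pyRange (-(limit - 1)) 0 1 ++ PySem.List.pyRange 1 m 1 ++
        powsBelow fd fuel p).Pairwise (· < ·) := by
  refine List.pairwise_append.mpr ⟨pairwise_base m limit, pairwise_powsBelow fd fuel p hp, ?_⟩
  intro x hx y hy
  have hy' := bounds_of_mem_powsBelow fd fuel p y hp hy
  rcases List.mem_append.mp hx with h | h <;> rw [PySem.List.mem_pyRange_one] at h <;> omega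

-- A = B, base case (no extra-powers chunk), all scalars explicit
theorem eq_case_base (m limit : Int) (hm : 1 ≤ m) (hml : m ≤ limit) :
    PySem.List.sorted (PySem.Set.ofList (PySem.List.pyRange 1 m 1 ++
        (PySem.List.pyRange 1 limit 1).map (fun i => -i) ++
        pow2Asc m ((m - 1).toNat) 1 ++ pow2AscNeg m ((m - 1).toNat) 1)) (fun x => x) false
      = PySem.List.pyRange (-(limit - 1)) 0 1 ++ PySem.List.pyRange 1 m 1 := by
  have hpw := pairwise_base m limit
  apply PySem.List.sorted_eq_of_perm_of_pairwise_lt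
  · refine (List.perm_ext_iff_of_nodup ((hpw.imp fun h => ne_of_lt h))
      (PySem.Set.nodup_ofList _)).mpr ?_
    intro x
    rw [PySem.Set.mem_ofList]
    exact (mem_alt_base m limit x).trans (mem_a_concat_base m limit x hm hml).symm
  · exact hpw

-- A = B, extra-powers case, all scalars explicit
theorem eq_case_ext (m limit fd : Int) (hm : 1 ≤ m) (hml : m ≤ limit) (hfd : m < fd) :
    PySem.List.sorted (PySem.Set.ofList (PySem.List.pyRange 1 m 1 ++
        (PySem.List.pyRange 1 limit 1).map (fun i => -i) ++
        pow2Asc m ((m - 1).toNat) 1 ++ pow2AscNeg m ((m - 1).toNat) 1 ++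
        pow2Asc fd ((fd - 1).toNat) 1)) (fun x => x) false
      = PySem.List.pyRange (-(limit - 1)) 0 1 ++ PySem.List.pyRange 1 m 1 ++
          powsBelow fd ((fd - firstPowGE m ((m - 1).toNat) 1).toNat)
            (firstPowGE m ((m - 1).toNat) 1) := by
  obtain ⟨k, he, hb, _⟩ := firstPowGE_spec m ((m - 1).toNat) 1 one_pos (by omega)
  have hp : 0 < firstPowGE m ((m - 1).toNat) 1 := firstPowGE_pos m ((m - 1).toNat) 1 one_pos
  have hmp : m ≤ firstPowGE m ((m - 1).toNat) 1 := by rw [he]; exact hb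
  have hpw := pairwise_ext m limit fd (firstPowGE m ((m - 1).toNat) 1)
    ((fd - firstPowGE m ((m - 1).toNat) 1).toNat) hp hmp
  apply PySem.List.sorted_eq_of_perm_of_pairwise_lt
  · refine (List.perm_ext_iff_of_nodup ((hpw.imp fun h => ne_of_lt h))
      (PySem.Set.nodup_ofList _)).mpr ?_
    intro x
    rw [PySem.Set.mem_ofList]
    exact (mem_alt_chunks m limit fd x hm hfd).trans (mem_a_concat m limit fd x hm hml hfd).symm
  · exact hpw

-- ===== VERDICT (by name: the statement is the Claim_ definition above) =====
theorem rotation_indices_py_spec : Claim_equal_rotation_indices_py := by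
  intro matrix_size n_test feature_dim _
  unfold Spec_rotation_indices_py rotation_indices_py rotation_indices_py_alt
  rcases feature_dim with _ | fd
  · simp only [List.append_nil]
    exact eq_case_base _ _ (le_max_left _ _) (le_max_left _ _)
  · by_cases hfd : (max 1 (if matrix_size = 0 then 1 else matrix_size)) < fd
    · simp only [if_pos hfd]
      exact eq_case_ext _ _ fd (le_max_left _ _) (le_max_left _ _) hfd
    · simp only [if_neg hfd, List.append_nil]
      exact eq_case_base _ _ (le_max_left _ _) (le_max_left _ _)
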